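-- pv_equiv track=rewrite | github.com/sculd/leetcode_solutions | remove_duplicate_letters.py | choose_one_front_letter
-- ===== SOURCE A (Python) =====
-- from collections import Counter, defaultdict
--
-- def choose_from_head(head: str, tail: str):
--     ch_choice = sorted(head)[0]
--
--     for i, ch in enumerate(head):
--         if ch == ch_choice:
--             # losers are chosen later
--             new_tail = head[i + 1:] + tail
--             new_tail = new_tail.replace(ch_choice, "")
--             return ch_choice, new_tail
--
-- def choose_one_front_letter(s: str):
--     cnts = Counter(s)
--     running_cnts = defaultdict(int)
--     for i, c in enumerate(s):
--         running_cnts[c] += 1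
--         # seen all occurance of c, must choose now
--         if cnts[c] == running_cnts[c]:
--             head, tail = s[:i+1], s[i+1:]
--             return choose_from_head(head, tail)
--
--     return choose_from_head(s, "")
-- ===== SOURCE B (Python) =====
-- def choose_one_front_letter(s: str):
--     last = {c: i for i, c in enumerate(s)}
--     boundary = min(last.values())          # earliest index that is the last occurrence of its char
--     head = s[:boundary + 1]
--     ch = min(head)
--     j = s.index(ch)                        # first occurrence of ch lies inside head
--     return ch, s[j + 1:].replace(ch, "")
-- ===== Notes on version B (the rewrite author's own statement) =====
-- stated objective: simpler
-- what changed: Replaces A's forward scan with running per-character counts (Counter + defaultdict) and its sort of the head by a last-index table: boundary = min of each character's last index, head = s[:boundary+1], front letter = min(head), tail = s after its first occurrence with the letter removed.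
import Mathlib
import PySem

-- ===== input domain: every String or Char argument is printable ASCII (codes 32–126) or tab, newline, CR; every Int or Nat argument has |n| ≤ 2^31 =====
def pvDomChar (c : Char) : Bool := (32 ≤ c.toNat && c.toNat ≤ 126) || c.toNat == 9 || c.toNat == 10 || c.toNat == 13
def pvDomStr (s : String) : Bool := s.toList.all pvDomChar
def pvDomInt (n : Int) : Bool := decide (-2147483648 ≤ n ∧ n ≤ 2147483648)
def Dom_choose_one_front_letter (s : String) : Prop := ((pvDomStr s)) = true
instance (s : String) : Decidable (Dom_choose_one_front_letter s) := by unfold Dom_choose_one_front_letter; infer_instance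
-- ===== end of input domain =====

-- B replaces A's running-count forward scan by a last-index table: boundary = min of the last
-- occurrence indices, front letter = min of s[:boundary+1]; objective: simpler (Pre_ excludes
-- only the empty string, on which A raises IndexError).


-- ===== PORT A =====
-- the for-loop of choose_from_head, over enumerate(head)
def pvGoA (chc : Char) (head tail : List Char) : List (Int × Char) → String × String
  | [] => ("", "")  -- Python falls off the loop and returns None; unreachable (chc ∈ head)
  | (i, c) :: rest =>
    if c == chc then
      (String.ofList [chc],
       String.ofList (PySem.Chars.replace (PySem.List.slice head (some (i + 1)) none ++ tail) [chc] []))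
    else pvGoA chc head tail rest

def pvChooseFromHead (head tail : List Char) : String × String :=
  match (PySem.List.sorted head (fun x => x) false).head? with
  | none => ("", "")  -- sorted('')[0] raises IndexError; excluded by Pre_
  | some chc => pvGoA chc head tail (PySem.List.enumerate head 0)

-- the for-loop of choose_one_front_letter, over enumerate(s), carrying running_cnts
def pvRunA (cnts : PySem.Dict Char Int) (l : List Char) :
    PySem.Dict Char Int → List (Int × Char) → Option (List Char × List Char)
  | _, [] => none
  | run, (i, c) :: rest =>
    let run' := run.modify c 0 (· + 1)
    if cnts.getD c 0 == run'.getD c 0 then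
      some (PySem.List.slice l none (some (i + 1)), PySem.List.slice l (some (i + 1)) none)
    else pvRunA cnts l run' rest

def choose_one_front_letter (s : String) : String × String :=
  let l := s.toList
  match pvRunA (PySem.Dict.counter l) l PySem.Dict.empty (PySem.List.enumerate l 0) with
  | some (h, t) => pvChooseFromHead h t
  | none => pvChooseFromHead l []

-- ===== PORT B =====
def choose_one_front_letter_alt (s : String) : String × String :=
  let l := s.toList
  let last := (PySem.List.enumerate l 0).foldl
      (fun d p => d.insert p.2 p.1) (PySem.Dict.empty : PySem.Dict Char Int)
  match PySem.List.min? (PySem.Dict.values last) (fun x => x) with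
  | none => ("", "")  -- min of an empty dict's values raises ValueError; excluded by Pre_
  | some b =>
    let head := PySem.List.slice l none (some (b + 1))
    match PySem.List.min? head (fun x => x) with
    | none => ("", "")  -- unreachable for nonempty s
    | some ch =>
      match PySem.List.index? l ch with
      | none => ("", "")  -- unreachable: ch ∈ l
      | some j =>
        (String.ofList [ch],
         String.ofList (PySem.Chars.replace (PySem.List.slice l (some ((j : Int) + 1)) none) [ch] []))

-- ===== PRECONDITION & SPEC =====
-- Pre_ excludes only the empty string: there A raises IndexError (and B raises ValueError).
def Pre_choose_one_front_letter (s : String) : Prop := s ≠ ""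
instance (s : String) : Decidable (Pre_choose_one_front_letter s) := by
  unfold Pre_choose_one_front_letter; infer_instance

def pvWitness_choose_one_front_letter : String := "cbacdcbc"

def Spec_choose_one_front_letter (s : String) (out : String × String) : Prop :=
  out = choose_one_front_letter_alt s
instance (s : String) (out : String × String) : Decidable (Spec_choose_one_front_letter s out) := by
  unfold Spec_choose_one_front_letter; infer_instance

-- ===== CLAIM (what is proved, stated in full; the proofs are below) =====
def Claim_equal_choose_one_front_letter : Prop :=
  ∀ (s : String), Dom_choose_one_front_letter s → Pre_choose_one_front_letter s →
    Spec_choose_one_front_letter s (choose_one_front_letter s)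

-- ===== LEMMAS AND PROOFS =====

def pvFLI : List Char → Nat
  | [] => 0
  | c :: rest => if c ∈ rest then pvFLI rest + 1 else 0

def pvLastIdx (c : Char) : List Char → Option Nat
  | [] => none
  | x :: rest =>
    match pvLastIdx c rest with
    | some k => some (k + 1)
    | none => if x = c then some 0 else none

theorem pvLastIdx_eq_none_iff (c : Char) (l : List Char) : pvLastIdx c l = none ↔ c ∉ l := by
  induction l with
  | nil => simp [pvLastIdx]
  | cons x rest ih =>
    constructor
    · intro hn
      simp only [pvLastIdx] at hn
      cases h : pvLastIdx c rest with
      | some k => rw [h] at hn; simp at hn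
      | none =>
        rw [h] at hn
        by_cases hx : x = c
        · rw [if_pos hx] at hn; simp at hn
        · simp only [List.mem_cons, not_or]
          exact ⟨fun hcx => hx hcx.symm, ih.mp h⟩
    · intro hm
      have h1 : c ∉ rest := fun hr => hm (List.mem_cons_of_mem _ hr)
      have h2 : ¬ x = c := fun e => hm (by simp [e])
      simp only [pvLastIdx, ih.mpr h1, h2, if_false]

theorem pvFLI_lt_length (l : List Char) (h : l ≠ []) : pvFLI l < l.length := by
  induction l with
  | nil => simp at h
  | cons c rest ih =>
    simp only [pvFLI, List.length_cons]
    split_ifs with hc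
    · have : rest ≠ [] := by rintro rfl; simp at hc
      have := ih this; omega
    · omega

theorem pvLastIdx_self (l : List Char) (h : pvFLI l < l.length) :
    pvLastIdx (l[pvFLI l]) l = some (pvFLI l) := by
  induction l with
  | nil => simp at h
  | cons c rest ih =>
    by_cases hc : c ∈ rest
    · have hr : rest ≠ [] := by rintro rfl; simp at hc
      have hlt : pvFLI rest < rest.length := pvFLI_lt_length rest hr
      simp only [pvFLI, if_pos hc, List.getElem_cons_succ]
      simp only [pvLastIdx, ih hlt]
    · have hn : pvLastIdx c rest = none := (pvLastIdx_eq_none_iff c rest).mpr hc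
      simp [pvFLI, hc, pvLastIdx, hn]

theorem pvFLI_le_lastIdx (c : Char) (l : List Char) (k : Nat) (h : pvLastIdx c l = some k) :
    pvFLI l ≤ k := by
  induction l generalizing k with
  | nil => simp [pvLastIdx] at h
  | cons x rest ih =>
    simp only [pvLastIdx] at h
    by_cases hx : x ∈ rest
    · simp only [pvFLI, if_pos hx]
      cases hr : pvLastIdx c rest with
      | some k' => rw [hr] at h; simp at h; have := ih k' hr; omega
      | none =>
        rw [hr] at h
        by_cases hxc : x = c
        · subst hxc
          exact absurd ((pvLastIdx_eq_none_iff x rest).mp hr) (by simp [hx])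
        · rw [if_neg hxc] at h; simp at h
    · simp [pvFLI, hx]
theorem pvLastDict_get? (l : List Char) : ∀ (n : Int) (d : PySem.Dict Char Int) (c : Char),
    ((PySem.List.enumerate l n).foldl (fun d p => d.insert p.2 p.1) d).get? c
      = match pvLastIdx c l with
        | some k => some (n + k)
        | none => d.get? c := by
  induction l with
  | nil => intro n d c; simp [PySem.List.enumerate_nil, pvLastIdx]
  | cons x rest ih =>
    intro n d c
    rw [PySem.List.enumerate_cons, List.foldl_cons, ih]
    cases hr : pvLastIdx c rest with
    | some k => simp only [pvLastIdx, hr]; push_cast; ring_nf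
    | none =>
      simp only [pvLastIdx, hr]
      by_cases hxc : x = c
      · subst hxc; simp [PySem.Dict.get?_insert_self]
      · rw [PySem.Dict.get?_insert_of_ne d n (fun e => hxc e.symm)]
        simp [hxc]

theorem pvDropTakeAppend (l : List Char) (k n : Nat) (h : k ≤ n) :
    (l.take n).drop k ++ l.drop n = l.drop k := by
  rw [List.drop_take]
  have h2 : l.drop n = (l.drop k).drop (n - k) := by rw [List.drop_drop]; congr 1; omega
  rw [h2, List.take_append_drop]

theorem pvGoA_eq (chc : Char) (head tail : List Char) (hd : List Char) : ∀ (n : Nat),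
    pvGoA chc head tail (PySem.List.enumerate hd (n : Int))
      = match PySem.List.index? hd chc with
        | none => ("", "")
        | some k =>
          (String.ofList [chc],
           String.ofList (PySem.Chars.replace (head.drop (n + k + 1) ++ tail) [chc] [])) := by
  induction hd with
  | nil => intro n; simp [PySem.List.enumerate_nil, pvGoA, PySem.List.index?]
  | cons x rest ih =>
    intro n
    rw [PySem.List.enumerate_cons]
    by_cases hx : x = chc
    · subst hx
      rw [PySem.List.index?_cons_self]
      simp only [pvGoA, beq_self_eq_true, if_true]
      have : (n : Int) + 1 = ((n + 1 : Nat) : Int) := by push_cast; ring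
      rw [this, PySem.List.slice_from_natCast]
    · have hne : (x == chc) = false := by simp [hx]
      simp only [pvGoA, hne, Bool.false_eq_true, if_false]
      have : (n : Int) + 1 = ((n + 1 : Nat) : Int) := by push_cast; ring
      rw [this, ih (n + 1), PySem.List.index?_cons_of_ne rest hx]
      cases PySem.List.index? rest chc with
      | none => rfl
      | some k =>
        simp only [Option.map_some]
        have : n + 1 + k + 1 = n + (k + 1) + 1 := by omega
        rw [this]

theorem pvHead_sorted_eq_min? (xs : List Char) :
    (PySem.List.sorted xs (fun x => x) false).head? = PySem.List.min? xs (fun x => x) := by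
  cases hx : xs with
  | nil => simp [(PySem.List.sorted_eq_nil_iff ([] : List Char) (fun x => x) false).mpr rfl,
                 (PySem.List.min?_eq_none_iff ([] : List Char) (fun x => x)).mpr rfl]
  | cons a t =>
    cases hs : (PySem.List.sorted (a :: t) (fun x => x) false) with
    | nil => exact absurd ((PySem.List.sorted_eq_nil_iff (a :: t) (fun x => x) false).mp hs) (by simp)
    | cons m ms =>
      cases hm : PySem.List.min? (a :: t) (fun x => x) with
      | none => exact absurd ((PySem.List.min?_eq_none_iff (a :: t) (fun x => x)).mp hm) (by simp)
      | some mv =>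
        have hmem : m ∈ (a :: t) := by
          have := PySem.List.sorted_perm (a :: t) (fun x : Char => x) false
          rw [hs] at this
          exact this.mem_iff.mp (by simp)
        have h1 : m ≤ mv := PySem.List.key_head_sorted_le (a :: t) (fun x => x) hs mv (PySem.List.min?_mem hm)
        have h2 : mv ≤ m := PySem.List.min?_isMin hm m hmem
        simp [le_antisymm h1 h2]

theorem pvRunA_cons (rest : List Char) : ∀ (p : List Char) (c : Char),
    pvRunA (PySem.Dict.counter (p ++ c :: rest)) (p ++ c :: rest)
        (PySem.Dict.counter p) (PySem.List.enumerate (c :: rest) (p.length : Int))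
      = some ((p ++ c :: rest).take (p.length + pvFLI (c :: rest) + 1),
              (p ++ c :: rest).drop (p.length + pvFLI (c :: rest) + 1)) := by
  induction rest with
  | nil =>
    intro p c
    rw [PySem.List.enumerate_cons, PySem.List.enumerate_nil]
    simp only [pvRunA]
    rw [← PySem.Dict.counter_append_singleton p c]
    have hl : p ++ c :: ([] : List Char) = p ++ [c] := rfl
    rw [hl]
    rw [if_pos (by simp)]
    have h1 : (p.length : Int) + 1 = ((p.length + 1 : Nat) : Int) := by push_cast; ring
    rw [h1, PySem.List.slice_to_natCast, PySem.List.slice_from_natCast]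
    have : pvFLI [c] = 0 := by simp [pvFLI]
    rw [this]
  | cons c2 rest2 ih =>
    intro p c
    rw [PySem.List.enumerate_cons]
    simp only [pvRunA]
    rw [← PySem.Dict.counter_append_singleton p c]
    by_cases hmem : c ∈ c2 :: rest2
    · -- condition is false: c occurs again later
      rw [if_neg (by
        rw [PySem.Dict.getD_counter, PySem.Dict.getD_counter, beq_iff_eq]
        intro he
        have hc1 : List.count c (p ++ c :: c2 :: rest2)
            = List.count c p + (List.count c (c2 :: rest2) + 1) := by
          simp [List.count_append, List.count_cons]
        have hc2 : List.count c (p ++ [c]) = List.count c p + 1 := by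
          simp [List.count_append]
        have hpos : 0 < List.count c (c2 :: rest2) := List.count_pos_iff.mpr hmem
        rw [hc1, hc2] at he
        have := Nat.cast_inj (R := Int) |>.mp he
        omega)]
      have hassoc : p ++ c :: c2 :: rest2 = (p ++ [c]) ++ c2 :: rest2 := by simp
      have hlen : (p.length : Int) + 1 = ((p ++ [c]).length : Nat) := by
        simp
      rw [hlen]
      rw [hassoc]
      rw [ih (p ++ [c]) c2]
      have hf : pvFLI (c :: c2 :: rest2) = pvFLI (c2 :: rest2) + 1 := by
        simp [pvFLI, hmem]
      have hlen2 : (p ++ [c]).length + pvFLI (c2 :: rest2) + 1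
          = p.length + pvFLI (c :: c2 :: rest2) + 1 := by
        simp [hf]; omega
      rw [hlen2]
    · -- condition is true: this is the last occurrence of c
      rw [if_pos (by
        rw [PySem.Dict.getD_counter, PySem.Dict.getD_counter, beq_iff_eq]
        have hc0 : List.count c (c2 :: rest2) = 0 := List.count_eq_zero.mpr hmem
        have hc1 : List.count c (p ++ c :: c2 :: rest2) = List.count c p + 1 := by
          simp [List.count_append, hc0]
        have hc2 : List.count c (p ++ [c]) = List.count c p + 1 := by
          simp [List.count_append]
        rw [hc1, hc2])]
      have h1 : (p.length : Int) + 1 = ((p.length + 1 : Nat) : Int) := by push_cast; ring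
      rw [h1, PySem.List.slice_to_natCast, PySem.List.slice_from_natCast]
      have : pvFLI (c :: c2 :: rest2) = 0 := by simp [pvFLI, hmem]
      rw [this]


-- ===== VERDICT (by name: the statement is the Claim_ definition above) =====
theorem choose_one_front_letter_spec : Claim_equal_choose_one_front_letter := by
  intro s _ hpre
  unfold Spec_choose_one_front_letter
  have hl : s.toList ≠ [] := fun h => hpre (String.toList_eq_nil_iff.mp h)
  obtain ⟨c, rest, hcr⟩ : ∃ c rest, s.toList = c :: rest := by
    cases h : s.toList with
    | nil => exact absurd h hl
    | cons a b => exact ⟨a, b, rfl⟩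
  have hMlt : pvFLI (c :: rest) < (c :: rest).length := pvFLI_lt_length _ (by simp)
  set M := pvFLI (c :: rest) with hM
  set head := (c :: rest).take (M + 1) with hhead
  set tail := (c :: rest).drop (M + 1) with htail
  have hheadlen : head.length = M + 1 := by
    rw [hhead, List.length_take]; omega
  have hheadne : head ≠ [] := by
    intro h; rw [h] at hheadlen; simp at hheadlen
  -- ===== A side =====
  have hA0 := pvRunA_cons rest [] c
  simp only [List.nil_append, List.length_nil, Nat.cast_zero, Nat.zero_add] at hA0
  have hce : (PySem.Dict.counter ([] : List Char) : PySem.Dict Char Int) = PySem.Dict.empty := rfl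
  rw [hce] at hA0
  -- ===== B side: the last-index dictionary =====
  have hget : ∀ c', ((PySem.List.enumerate (c :: rest) (0 : Int)).foldl
      (fun d p => d.insert p.2 p.1) (PySem.Dict.empty : PySem.Dict Char Int)).get? c'
        = (pvLastIdx c' (c :: rest)).map (fun k => (k : Int)) := by
    intro c'
    rw [pvLastDict_get?]
    cases pvLastIdx c' (c :: rest) with
    | none => rfl
    | some k => simp
  set D := (PySem.List.enumerate (c :: rest) (0 : Int)).foldl
      (fun d p => d.insert p.2 p.1) (PySem.Dict.empty : PySem.Dict Char Int) with hD
  have hnd : D.keys.Nodup := by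
    rw [hD]
    exact PySem.Dict.nodup_keys_foldl_insert_key _ Prod.snd (fun _ x => x.1) _
      (by simp [PySem.Dict.keys_empty])
  have hMget : D.get? ((c :: rest)[M]) = some (M : Int) := by
    rw [hget, pvLastIdx_self _ hMlt]; rfl
  have hMmem : (M : Int) ∈ D.values := by
    have hitem := PySem.Dict.mem_items_of_get?_eq_some D hMget
    simp only [PySem.Dict.values]
    exact List.mem_map.mpr ⟨_, hitem, rfl⟩
  have hlow : ∀ v ∈ D.values, (M : Int) ≤ v := by
    intro v hv
    simp only [PySem.Dict.values, List.mem_map] at hv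
    obtain ⟨pr, hpr, hsnd⟩ := hv
    have hg := PySem.Dict.get?_of_mem_items D (k := pr.1) (v := pr.2) (by simpa using hpr) hnd
    rw [hget] at hg
    cases hk : pvLastIdx pr.1 (c :: rest) with
    | none => rw [hk] at hg; simp at hg
    | some k =>
      rw [hk] at hg
      have hg2 : pr.2 = (k : Int) := by simpa using hg.symm
      have hle := pvFLI_le_lastIdx pr.1 _ k hk
      rw [← hsnd, hg2]
      exact_mod_cast hle
  have hbM : PySem.List.min? D.values (fun x => x) = some (M : Int) := by
    cases hmin : PySem.List.min? D.values (fun x => x) with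
    | none =>
      have := (PySem.List.min?_eq_none_iff D.values (fun x => x)).mp hmin
      rw [this] at hMmem; simp at hMmem
    | some b =>
      have hb1 : b ≤ (M : Int) := PySem.List.min?_isMin hmin _ hMmem
      have hb2 : (M : Int) ≤ b := hlow b (PySem.List.min?_mem hmin)
      rw [le_antisymm hb1 hb2]
  have hcast1 : (M : Int) + 1 = ((M + 1 : Nat) : Int) := by push_cast; ring
  have hslice : PySem.List.slice (c :: rest) none (some ((M : Int) + 1)) = head := by
    rw [hcast1, PySem.List.slice_to_natCast]
  obtain ⟨ch, hch⟩ : ∃ ch, PySem.List.min? head (fun x => x) = some ch := by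
    cases h : PySem.List.min? head (fun x => x) with
    | none => exact absurd ((PySem.List.min?_eq_none_iff head (fun x => x)).mp h) hheadne
    | some ch => exact ⟨ch, rfl⟩
  have hchmem : ch ∈ head := PySem.List.min?_mem hch
  have hsplit : (c :: rest) = head ++ tail := (List.take_append_drop _ _).symm
  obtain ⟨j, hj⟩ : ∃ j, PySem.List.index? head ch = some j := by
    cases h : PySem.List.index? head ch with
    | none => exact absurd ((PySem.List.index?_eq_none_iff head ch).mp h) (by simp [hchmem])
    | some j => exact ⟨j, rfl⟩
  have hjl : PySem.List.index? (c :: rest) ch = some j := by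
    rw [hsplit, PySem.List.index?_append_of_mem tail hchmem, hj]
  obtain ⟨hjlt, -, -⟩ := PySem.List.getElem_of_index?_eq_some hj
  have hjM : j + 1 ≤ M + 1 := by rw [hheadlen] at hjlt; omega
  have htails : head.drop (j + 1) ++ tail = (c :: rest).drop (j + 1) := by
    rw [hhead, htail]
    exact pvDropTakeAppend (c :: rest) (j + 1) (M + 1) hjM
  have hgo := pvGoA_eq ch head tail head 0
  simp only [Nat.cast_zero, Nat.zero_add] at hgo
  have hcast2 : (j : Int) + 1 = ((j + 1 : Nat) : Int) := by push_cast; ring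
  simp only [choose_one_front_letter, choose_one_front_letter_alt, hcr]
  rw [hA0, hbM]
  dsimp only
  rw [hslice, hch]
  dsimp only
  rw [hjl]
  dsimp only
  rw [hcast2, PySem.List.slice_from_natCast]
  rw [← hM, ← hhead, ← htail]
  simp only [pvChooseFromHead, pvHead_sorted_eq_min?, hch]
  rw [hgo, hj]
  dsimp only
  rw [htails]
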